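-- pv_equiv track=rewrite | github.com/AnchalNigam/Code-Time | prettyNum.py | prettyNum
-- ===== SOURCE A (Python) =====
-- def prettyNum(numRange):
--   prettyNumbers = [2, 3, 9]
--   prettyCount = 0
--   for num in range(numRange[0], numRange[1]+1):
--     strNum = str(num)
--     if int(strNum[len(strNum)-1]) in prettyNumbers:
--       prettyCount += 1
--   return prettyCount
-- ===== SOURCE B (Python) =====
-- def prettyNum(numRange):
--     a, b = numRange[0], numRange[1]
--     if a > b:
--         return 0
--     def upto(n, d):
--         # count of x in [0, n] with x % 10 == d  (1 <= d <= 9; 0 for n < d)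
--         return (n - d) // 10 + 1 if n >= d else 0
--     total = 0
--     for d in (2, 3, 9):
--         if b >= 0:
--             total += upto(b, d) - upto(max(a, 0) - 1, d)
--         if a < 0:
--             total += upto(-a, d) - upto(max(-b, 1) - 1, d)
--     return total
-- ===== Notes on version B (the rewrite author's own statement) =====
-- stated objective: alternative
-- what changed: A iterates every integer in the range and inspects the last character of its decimal string; B computes the count of numbers with |n| mod 10 in {2,3,9} in closed form, one floor-division count per target digit for the nonnegative and the negative parts of the interval.
import Mathlib
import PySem

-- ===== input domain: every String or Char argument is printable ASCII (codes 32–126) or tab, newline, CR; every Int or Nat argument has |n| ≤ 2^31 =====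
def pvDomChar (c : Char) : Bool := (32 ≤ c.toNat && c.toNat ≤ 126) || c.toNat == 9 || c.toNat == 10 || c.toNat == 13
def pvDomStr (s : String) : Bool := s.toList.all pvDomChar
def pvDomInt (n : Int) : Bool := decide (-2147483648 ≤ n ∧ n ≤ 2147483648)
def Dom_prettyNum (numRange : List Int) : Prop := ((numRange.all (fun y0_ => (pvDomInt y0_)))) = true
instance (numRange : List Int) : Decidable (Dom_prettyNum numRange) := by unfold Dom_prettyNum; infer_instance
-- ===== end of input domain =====

-- B replaces A's element-by-element scan of the range by a closed-form count per target last digit.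

-- ===== PORT A =====
-- loop body of A: strNum = str(num); if int(strNum[len(strNum)-1]) in prettyNumbers: prettyCount += 1
-- (the `none` match arms are unreachable: str(num) is nonempty and ends in a digit)
def pvStepA (prettyNumbers : List Int) (prettyCount num : Int) : Int :=
  let strNum := PySem.Int.toChars num
  match PySem.List.pyGet? strNum (PySem.List.len strNum - 1) with
  | some c =>
    match PySem.Int.ofChars? [c] with
    | some d => if d ∈ prettyNumbers then prettyCount + 1 else prettyCount
    | none => prettyCount
  | none => prettyCount

def prettyNum (numRange : List Int) : Int :=
  let prettyNumbers : List Int := [2, 3, 9]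
  (PySem.List.pyRange (PySem.List.pyGetD numRange 0 0) (PySem.List.pyGetD numRange 1 0 + 1) 1).foldl
    (pvStepA prettyNumbers) 0

-- ===== PORT B =====
-- count of x in [0, n] with x % 10 = d  (1 ≤ d ≤ 9; 0 for n < d)
def pvUpto (n d : Int) : Int := if n ≥ d then PySem.Int.floordiv (n - d) 10 + 1 else 0

-- B's per-digit contribution: nonnegative part of [a, b], then (as absolute values) the negative part
def pvDigitTerm (a b d : Int) : Int :=
  (if b ≥ 0 then pvUpto b d - pvUpto (max a 0 - 1) d else 0) +
  (if a < 0 then pvUpto (-a) d - pvUpto (max (-b) 1 - 1) d else 0)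

def prettyNum_alt (numRange : List Int) : Int :=
  let a := PySem.List.pyGetD numRange 0 0
  let b := PySem.List.pyGetD numRange 1 0
  if a > b then 0
  else [2, 3, 9].foldl (fun total d => total + pvDigitTerm a b d) 0

-- ===== PRECONDITION & SPEC =====
-- Pre_ excludes exactly the too-short lists, on which Python A's first two element lookups raise IndexError.
def Pre_prettyNum (numRange : List Int) : Prop := 2 ≤ numRange.length
instance (numRange : List Int) : Decidable (Pre_prettyNum numRange) := by unfold Pre_prettyNum; infer_instance
def pvWitness_prettyNum : List Int := [2, 9]
def Spec_prettyNum (numRange : List Int) (out : Int) : Prop := out = prettyNum_alt numRange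
instance (numRange : List Int) (out : Int) : Decidable (Spec_prettyNum numRange out) := by unfold Spec_prettyNum; infer_instance

-- ===== CLAIM (what is proved, stated in full; the proofs are below) =====
def Claim_equal_prettyNum : Prop := ∀ (numRange : List Int), Dom_prettyNum numRange → Pre_prettyNum numRange → Spec_prettyNum numRange (prettyNum numRange)

-- ===== LEMMAS AND PROOFS =====

-- `n % 10 == last decimal digit of |n|`: str(n) ends with the digit character of |n| % 10
theorem pvToDigitsCore_suffix (b fuel n : Nat) (acc : List Char) :
    ∃ l, Nat.toDigitsCore b fuel n acc = l ++ acc := by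
  induction fuel generalizing n acc with
  | zero => exact ⟨[], rfl⟩
  | succ f ih =>
    simp only [Nat.toDigitsCore]
    split
    · exact ⟨[(n % b).digitChar], rfl⟩
    · obtain ⟨l, hl⟩ := ih (n / b) ((n % b).digitChar :: acc)
      exact ⟨l ++ [(n % b).digitChar], by simpa using hl⟩

theorem pvToDigits_last (m : Nat) :
    ∃ l, Nat.toDigits 10 m = l ++ [(m % 10).digitChar] := by
  unfold Nat.toDigits
  simp only [Nat.toDigitsCore]
  split
  · exact ⟨[], rfl⟩
  · exact pvToDigitsCore_suffix 10 m (m / 10) [(m % 10).digitChar]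

theorem pvToChars_last (n : Int) :
    ∃ l, PySem.Int.toChars n = l ++ [(n.natAbs % 10).digitChar] := by
  unfold PySem.Int.toChars
  split
  · obtain ⟨l, hl⟩ := pvToDigits_last n.natAbs
    exact ⟨'-' :: l, by simp [hl]⟩
  · obtain ⟨l, hl⟩ := pvToDigits_last n.toNat
    have h2 : n.toNat % 10 = n.natAbs % 10 := by omega
    exact ⟨l, by rw [hl, h2]⟩

theorem pvLastchar (n : Int) :
    PySem.List.pyGet? (PySem.Int.toChars n) (PySem.List.len (PySem.Int.toChars n) - 1)
      = some ((n.natAbs % 10).digitChar) := by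
  obtain ⟨l, hl⟩ := pvToChars_last n
  rw [hl]
  have : PySem.List.len (l ++ [(n.natAbs % 10).digitChar]) - 1 = (l.length : Int) := by
    simp [PySem.List.len_eq]
  rw [this]
  exact PySem.List.pyGet?_append_length l [] _

theorem pvOfChars_digit (d : Nat) (h : d < 10) :
    PySem.Int.ofChars? [d.digitChar] = some (d : Int) := by
  interval_cases d <;> decide

-- the per-element test of A, as a Bool predicate on the number
def pvPretty (n : Int) : Bool := decide (n.natAbs % 10 = 2 ∨ n.natAbs % 10 = 3 ∨ n.natAbs % 10 = 9)

theorem pvStepA_eq (cnt num : Int) :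
    pvStepA [2, 3, 9] cnt num = if pvPretty num then cnt + 1 else cnt := by
  simp only [pvStepA, pvLastchar num, pvOfChars_digit (num.natAbs % 10) (by omega)]
  simp only [pvPretty, List.mem_cons, List.not_mem_nil, or_false, decide_eq_true_eq]
  split_ifs <;> omega

-- B's total, after the two list lookups
def pvG (a b : Int) : Int :=
  if a > b then 0 else [2, 3, 9].foldl (fun total d => total + pvDigitTerm a b d) 0

theorem pvG_eq (a b : Int) :
    pvG a b = if a > b then 0 else pvDigitTerm a b 2 + pvDigitTerm a b 3 + pvDigitTerm a b 9 := by
  unfold pvG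
  simp only [List.foldl]
  split_ifs with h
  · rfl
  · ring

-- closed-form step: one digit class, extending the interval [a, b-1] to [a, b]
set_option maxHeartbeats 1000000 in
theorem pvDigitTerm_step (a b d : Int) (hab : a ≤ b) (hd1 : 1 ≤ d) (hd9 : d ≤ 9) :
    pvDigitTerm a b d = pvDigitTerm a (b - 1) d + (if (b.natAbs % 10 : Int) = d then 1 else 0) := by
  simp only [pvDigitTerm, pvUpto, PySem.Int.floordiv_eq_ediv_of_pos (by norm_num : (0:Int) < 10),
    max_def]
  split_ifs <;> omega

theorem pvIndicator_split (b : Int) :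
    (if pvPretty b then (1 : Int) else 0)
      = (if (b.natAbs % 10 : Int) = 2 then 1 else 0)
        + (if (b.natAbs % 10 : Int) = 3 then 1 else 0)
        + (if (b.natAbs % 10 : Int) = 9 then 1 else 0) := by
  simp only [pvPretty, decide_eq_true_eq]
  split_ifs <;> omega

theorem pvG_step (a b : Int) (hab : a ≤ b) :
    pvG a b = pvG a (b - 1) + (if pvPretty b then 1 else 0) := by
  rw [pvG_eq, pvG_eq, if_neg (by omega), pvIndicator_split,
    pvDigitTerm_step a b 2 hab (by norm_num) (by norm_num),
    pvDigitTerm_step a b 3 hab (by norm_num) (by norm_num),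
    pvDigitTerm_step a b 9 hab (by norm_num) (by norm_num)]
  by_cases h : a > b - 1
  · -- b = a: each pvDigitTerm a (a-1) d is 0
    have h0 : ∀ d : Int, 1 ≤ d → pvDigitTerm a (b - 1) d = 0 := by
      intro d hd
      simp only [pvDigitTerm, pvUpto,
        PySem.Int.floordiv_eq_ediv_of_pos (by norm_num : (0:Int) < 10), max_def]
      split_ifs <;> omega
    rw [if_pos h, h0 2 (by norm_num), h0 3 (by norm_num), h0 9 (by norm_num)]
    ring
  · rw [if_neg h]; ring

theorem pvRange_empty (a c : Int) (h : c ≤ a) : PySem.List.pyRange a c 1 = [] := by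
  simp [PySem.List.pyRange]
  omega

theorem pvCount_eq (k : Nat) : ∀ a b : Int, (b + 1 - a).toNat = k →
    ((PySem.List.pyRange a (b + 1) 1).countP pvPretty : Int) = pvG a b := by
  induction k with
  | zero =>
    intro a b hk
    rw [pvRange_empty a (b + 1) (by omega)]
    simp [pvG, if_pos (by omega : a > b)]
  | succ k ih =>
    intro a b hk
    have hab : a ≤ b := by omega
    rw [PySem.List.pyRange_one_succ_right hab, List.countP_append]
    have hb : PySem.List.pyRange a b 1 = PySem.List.pyRange a ((b - 1) + 1) 1 := by ring_nf
    rw [hb, pvG_step a b hab]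
    have := ih a (b - 1) (by omega)
    simp only [List.countP_cons, List.countP_nil]
    push_cast
    rw [this]
    by_cases hp : pvPretty b <;> simp [hp]

-- ===== VERDICT (by name: the statement is the Claim_ definition above) =====
theorem prettyNum_spec : Claim_equal_prettyNum := by
  intro numRange _ _
  unfold Spec_prettyNum
  have h1 : prettyNum numRange
      = List.foldl (fun (acc x : Int) => if pvPretty x then acc + 1 else acc) 0
          (PySem.List.pyRange (PySem.List.pyGetD numRange 0 0)
            (PySem.List.pyGetD numRange 1 0 + 1) 1) := by
    show List.foldl (pvStepA [2, 3, 9]) 0 _ = _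
    rw [show pvStepA [2, 3, 9] = (fun (acc x : Int) => if pvPretty x then acc + 1 else acc)
      from funext fun c => funext fun n => pvStepA_eq c n]
  have h2 : prettyNum_alt numRange
      = pvG (PySem.List.pyGetD numRange 0 0) (PySem.List.pyGetD numRange 1 0) := rfl
  rw [h1, h2, PySem.List.foldl_count_if,
    pvCount_eq ((PySem.List.pyGetD numRange 1 0 + 1 - PySem.List.pyGetD numRange 0 0).toNat) _ _ rfl]
  ring
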